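-- pv_equiv track=rewrite | github.com/discernus/discernus | test_llm_csv_generation.py | _extract_csv_from_response
-- ===== SOURCE A (Python) =====
-- def _extract_csv_from_response(response: str) -> str:
--     """Extract CSV data from LLM response."""
--     lines = response.split('\n')
--     csv_lines = []
--     in_csv_section = False
--     in_code_block = False
--
--     for line in lines:
--         if line.strip().startswith('## CSV DATA') or line.strip().startswith('## STATISTICAL CSV DATA') or line.strip().startswith('## DERIVED METRICS CSV DATA'):
--             in_csv_section = True
--             continue
--         elif line.strip().startswith('## '):
--             in_csv_section = False
--             in_code_block = False
--             continue
--         elif in_csv_section and line.strip():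
--             # Handle markdown code blocks
--             if line.strip().startswith('```csv') or line.strip().startswith('```'):
--                 in_code_block = True
--                 continue
--             elif line.strip().startswith('```'):
--                 in_code_block = False
--                 continue
--             elif in_code_block or not line.strip().startswith('```'):
--                 csv_lines.append(line)
--
--     return '\n'.join(csv_lines).strip()
-- ===== SOURCE B (Python) =====
-- def _extract_csv_from_response(response: str) -> str:
--     """Extract CSV data from LLM response (group-then-filter decomposition)."""
--     # Pass 1: partition lines into sections under the most recent '## ' header.
--     sections = []
--     cur_header, cur_body = None, []
--     for line in response.split('\n'):
--         stripped = line.strip()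
--         if stripped.startswith('## '):
--             sections.append((cur_header, cur_body))
--             cur_header, cur_body = stripped, []
--         else:
--             cur_body.append(line)
--     sections.append((cur_header, cur_body))
--
--     # Pass 2: keep bodies of CSV sections, dropping blank and fence lines.
--     wanted = ('## CSV DATA', '## STATISTICAL CSV DATA', '## DERIVED METRICS CSV DATA')
--     out = []
--     for header, body in sections:
--         if header is not None and header.startswith(wanted):
--             for line in body:
--                 s = line.strip()
--                 if s and not s.startswith('```'):
--                     out.append(line)
--     return '\n'.join(out).strip()
-- ===== Notes on version B (the rewrite author's own statement) =====
-- stated objective: alternative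
-- what changed: Replaces A's single stateful scan with booleans by a two-pass group-then-filter decomposition: first partition the lines into header-delimited sections, then concatenate the filtered bodies of the CSV-headed sections.
import Mathlib
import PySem

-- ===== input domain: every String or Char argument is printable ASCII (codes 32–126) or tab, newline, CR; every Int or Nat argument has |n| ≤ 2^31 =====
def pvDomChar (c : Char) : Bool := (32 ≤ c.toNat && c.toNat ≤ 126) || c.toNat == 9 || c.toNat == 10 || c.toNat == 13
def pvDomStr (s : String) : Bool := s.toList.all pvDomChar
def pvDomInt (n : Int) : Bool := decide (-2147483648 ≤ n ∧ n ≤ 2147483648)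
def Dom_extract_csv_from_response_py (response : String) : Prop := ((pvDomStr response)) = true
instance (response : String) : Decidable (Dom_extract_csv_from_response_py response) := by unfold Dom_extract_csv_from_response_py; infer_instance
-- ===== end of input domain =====

-- B replaces A's single stateful scan by an explicit group-then-filter decomposition
-- (partition into header-delimited sections, then filter the CSV sections' bodies); same cost,
-- different structure. Equality of return values is proved on the whole domain.

-- ===== PORT A =====
-- the three '## …CSV DATA' header tests of A's first branch
def pvHdrCsv (s : String) : Bool :=
  PySem.Str.startswith s "## CSV DATA" || PySem.Str.startswith s "## STATISTICAL CSV DATA"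
    || PySem.Str.startswith s "## DERIVED METRICS CSV DATA"

def pvHdr (s : String) : Bool := PySem.Str.startswith s "## "

def pvFenceOr (s : String) : Bool :=
  PySem.Str.startswith s "```csv" || PySem.Str.startswith s "```"

def pvFence (s : String) : Bool := PySem.Str.startswith s "```"

-- one step of A's for-loop; state = (csv_lines, in_csv_section, in_code_block)
def pvAStep (st : List String × Bool × Bool) (line : String) : List String × Bool × Bool :=
  let s := PySem.Str.strip line
  if pvHdrCsv s then
    (st.1, true, st.2.2)
  else if pvHdr s then
    (st.1, false, false)
  else if st.2.1 && !(s == "") then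
    if pvFenceOr s then
      (st.1, st.2.1, true)
    else if pvFence s then
      (st.1, st.2.1, false)
    else if st.2.2 || !(pvFence s) then
      (st.1 ++ [line], st.2.1, st.2.2)
    else st
  else st

def extract_csv_from_response_py (response : String) : String :=
  let lines := (PySem.Str.split? response "\n").getD []   -- '\n' ≠ '', so split? is `some`
  let st := lines.foldl pvAStep ([], false, false)
  PySem.Str.strip (PySem.Str.join "\n" st.1)

-- ===== PORT B =====
-- pass 1 step: state = (finished sections, current header (none before the first header), current body)
def pvBGroupStep (st : List (Option String × List String) × Option String × List String)
    (line : String) : List (Option String × List String) × Option String × List String :=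
  let s := PySem.Str.strip line
  if pvHdr s then
    (st.1 ++ [(st.2.1, st.2.2)], some s, [])
  else
    (st.1, st.2.1, st.2.2 ++ [line])

-- `header is not None and header.startswith(wanted)`
def pvBWanted : Option String → Bool
  | none => false
  | some h => pvHdrCsv h

-- `s and not s.startswith('```')` for s = line.strip()
def pvBKeep (line : String) : Bool :=
  !(PySem.Str.strip line == "") && !(pvFence (PySem.Str.strip line))

-- pass 2: collect the filtered bodies of the CSV-headed sections
def pvBCollect (sections : List (Option String × List String)) : List String :=
  sections.foldl
    (fun acc g =>
      if pvBWanted g.1 then g.2.foldl (fun a l => if pvBKeep l then a ++ [l] else a) acc else acc)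
    []

def extract_csv_from_response_py_alt (response : String) : String :=
  let st := ((PySem.Str.split? response "\n").getD []).foldl pvBGroupStep ([], none, [])
  let sections := st.1 ++ [(st.2.1, st.2.2)]
  PySem.Str.strip (PySem.Str.join "\n" (pvBCollect sections))

-- ===== PRECONDITION & SPEC =====
def Spec_extract_csv_from_response_py (response : String) (out : String) : Prop := out = extract_csv_from_response_py_alt response
instance (response : String) (out : String) : Decidable (Spec_extract_csv_from_response_py response out) := by unfold Spec_extract_csv_from_response_py; infer_instance

-- ===== CLAIM (what is proved, stated in full; the proofs are below) =====
def Claim_equal_extract_csv_from_response_py : Prop := ∀ (response : String), Dom_extract_csv_from_response_py response → Spec_extract_csv_from_response_py response (extract_csv_from_response_py response)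

-- ===== LEMMAS AND PROOFS =====

-- common characterisation: the lines kept from `ls` given the current in_csv flag `b`
def pvCsv : List String → Bool → List String
  | [], _ => []
  | line :: rest, b =>
    let s := PySem.Str.strip line
    if pvHdrCsv s then pvCsv rest true
    else if pvHdr s then pvCsv rest false
    else (if b && pvBKeep line then [line] else []) ++ pvCsv rest b

theorem pv_prefix_trans {s : String} (p q : String) (hpq : p.toList <+: q.toList)
    (h : PySem.Str.startswith s q = true) : PySem.Str.startswith s p = true := by
  simp only [PySem.Str.startswith_eq, PySem.Chars.startswith_iff] at h ⊢
  exact hpq.trans h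

-- a line that is not a header matches none of the three CSV header tests
theorem pv_not_hdr {s : String} (h2 : pvHdr s = false) : pvHdrCsv s = false := by
  by_contra hc
  simp only [Bool.not_eq_false, pvHdrCsv, Bool.or_eq_true] at hc
  rcases hc with (h | h) | h
  · have := pv_prefix_trans "## " "## CSV DATA" (by decide) h
    rw [pvHdr] at h2; rw [h2] at this; exact Bool.noConfusion this
  · have := pv_prefix_trans "## " "## STATISTICAL CSV DATA" (by decide) h
    rw [pvHdr] at h2; rw [h2] at this; exact Bool.noConfusion this
  · have := pv_prefix_trans "## " "## DERIVED METRICS CSV DATA" (by decide) h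
    rw [pvHdr] at h2; rw [h2] at this; exact Bool.noConfusion this

-- A's '```csv' test is subsumed by its '```' test
theorem pv_fenceOr_eq (s : String) : pvFenceOr s = pvFence s := by
  cases hf : pvFence s with
  | true => simp [pvFenceOr, pvFence] at hf ⊢; exact Or.inr hf
  | false =>
    have hcsv : PySem.Str.startswith s "```csv" = false := by
      by_contra hc
      simp only [Bool.not_eq_false] at hc
      have := pv_prefix_trans "```" "```csv" (by decide) hc
      rw [pvFence] at hf; rw [hf] at this; exact Bool.noConfusion this
    simp [pvFenceOr, pvFence] at hf ⊢; exact ⟨hcsv, hf⟩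

theorem pvA_foldl (ls : List String) : ∀ (acc : List String) (b c : Bool),
    (ls.foldl pvAStep (acc, b, c)).1 = acc ++ pvCsv ls b := by
  induction ls with
  | nil => intro acc b c; simp [pvCsv]
  | cons line rest ih =>
    intro acc b c
    simp only [List.foldl_cons]
    by_cases h1 : pvHdrCsv (PySem.Str.strip line) = true
    · simp only [pvAStep, pvCsv, h1, reduceIte]
      exact ih acc true c
    · rw [Bool.not_eq_true] at h1
      by_cases h2 : pvHdr (PySem.Str.strip line) = true
      · simp only [pvAStep, pvCsv, h1, h2, reduceIte, Bool.false_eq_true]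
        exact ih acc false false
      · rw [Bool.not_eq_true] at h2
        by_cases h3 : (b && !(PySem.Str.strip line == "")) = true
        · by_cases h4 : pvFenceOr (PySem.Str.strip line) = true
          · have h5 : pvFence (PySem.Str.strip line) = true := (pv_fenceOr_eq _) ▸ h4
            have hk : (b && pvBKeep line) = false := by
              have : pvBKeep line = false := by unfold pvBKeep; rw [h5]; simp
              rw [this]; simp
            simp only [pvAStep, pvCsv, h1, h2, h3, h4, hk, reduceIte, Bool.false_eq_true,
              List.nil_append]
            exact ih acc b true
          · rw [Bool.not_eq_true] at h4
            have h5 : pvFence (PySem.Str.strip line) = false := (pv_fenceOr_eq _) ▸ h4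
            have hs : (!(PySem.Str.strip line == "")) = true := (Bool.and_eq_true_iff.mp h3).2
            have hb : b = true := (Bool.and_eq_true_iff.mp h3).1
            have hk : (b && pvBKeep line) = true := by
              have : pvBKeep line = true := by unfold pvBKeep; rw [h5, hs]; rfl
              rw [this, hb]; rfl
            simp only [pvAStep, pvCsv, h1, h2, h3, h4, h5, hk, reduceIte, Bool.false_eq_true,
              Bool.not_false, Bool.or_true]
            rw [ih (acc ++ [line]) b c]
            simp [List.append_assoc]
        · rw [Bool.not_eq_true] at h3
          have hk : (b && pvBKeep line) = false := by
            cases b with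
            | false => rfl
            | true =>
              rw [Bool.true_and] at h3 ⊢
              unfold pvBKeep; rw [h3]; rfl
          simp only [pvAStep, pvCsv, h1, h2, h3, hk, reduceIte, Bool.false_eq_true,
            List.nil_append]
          exact ih acc b c

theorem pvBCollect_general (gs : List (Option String × List String)) :
    ∀ (acc : List String),
    gs.foldl (fun acc g =>
        if pvBWanted g.1 then g.2.foldl (fun a l => if pvBKeep l then a ++ [l] else a) acc else acc)
      acc
    = acc ++ gs.flatMap (fun g => if pvBWanted g.1 then g.2.filter pvBKeep else []) := by
  induction gs with
  | nil => intro acc; simp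
  | cons g rest ih =>
    intro acc
    simp only [List.foldl_cons]
    rw [ih]
    by_cases h : pvBWanted g.1 = true
    · simp only [h, reduceIte, PySem.List.foldl_append_if_eq_filter, List.flatMap_cons,
        List.append_assoc]
    · rw [Bool.not_eq_true] at h
      simp only [h, reduceIte, Bool.false_eq_true, List.flatMap_cons, List.nil_append]

theorem pvBCollect_eq (gs : List (Option String × List String)) :
    pvBCollect gs = gs.flatMap (fun g => if pvBWanted g.1 then g.2.filter pvBKeep else []) := by
  simpa using pvBCollect_general gs []

theorem pvBCollect_append_single (gs : List (Option String × List String))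
    (h : Option String) (body : List String) :
    pvBCollect (gs ++ [(h, body)])
      = pvBCollect gs ++ (if pvBWanted h then body.filter pvBKeep else []) := by
  simp [pvBCollect_eq]

theorem pvB_foldl (ls : List String) :
    ∀ (done : List (Option String × List String)) (h : Option String) (body : List String),
    pvBCollect ((ls.foldl pvBGroupStep (done, h, body)).1
        ++ [((ls.foldl pvBGroupStep (done, h, body)).2.1, (ls.foldl pvBGroupStep (done, h, body)).2.2)])
      = pvBCollect done ++ (if pvBWanted h then body.filter pvBKeep else []) ++ pvCsv ls (pvBWanted h) := by
  induction ls with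
  | nil =>
    intro done h body
    simp [pvBCollect_append_single, pvCsv]
  | cons line rest ih =>
    intro done h body
    simp only [List.foldl_cons]
    by_cases h2 : pvHdr (PySem.Str.strip line) = true
    · simp only [pvBGroupStep, h2, reduceIte]
      rw [ih, pvBCollect_append_single]
      by_cases h1 : pvHdrCsv (PySem.Str.strip line) = true
      · have hw : pvBWanted (some (PySem.Str.strip line)) = true := by
          simp only [pvBWanted]; exact h1
        simp only [pvCsv, h1, hw, reduceIte, List.filter_nil, List.append_nil,
          List.append_assoc]
      · rw [Bool.not_eq_true] at h1
        have hw : pvBWanted (some (PySem.Str.strip line)) = false := by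
          simp only [pvBWanted]; exact h1
        simp only [pvCsv, h1, h2, hw, reduceIte, Bool.false_eq_true, List.append_nil,
          List.append_assoc]
    · rw [Bool.not_eq_true] at h2
      have h1 := pv_not_hdr h2
      simp only [pvBGroupStep, h2, reduceIte, Bool.false_eq_true]
      rw [ih]
      simp only [pvCsv, h1, h2, reduceIte, Bool.false_eq_true, List.filter_append]
      by_cases hw : pvBWanted h = true
      · by_cases hk : pvBKeep line = true
        · simp only [hw, hk, reduceIte, Bool.true_and, List.filter_cons, List.filter_nil,
            List.append_assoc]
        · rw [Bool.not_eq_true] at hk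
          simp only [hw, hk, reduceIte, Bool.true_and, Bool.false_eq_true, List.filter_cons,
            List.filter_nil, List.append_nil, List.nil_append]
      · rw [Bool.not_eq_true] at hw
        simp only [hw, reduceIte, Bool.false_eq_true, Bool.false_and, List.nil_append]

-- ===== VERDICT (by name: the statement is the Claim_ definition above) =====
theorem extract_csv_from_response_py_spec : Claim_equal_extract_csv_from_response_py := by
  intro response _
  unfold Spec_extract_csv_from_response_py
  simp only [extract_csv_from_response_py, extract_csv_from_response_py_alt]
  have hA := pvA_foldl ((PySem.Str.split? response "\n").getD []) [] false false
  have hB := pvB_foldl ((PySem.Str.split? response "\n").getD []) [] none []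
  simp only [List.nil_append] at hA
  rw [hA, hB]
  simp [pvBCollect, pvBWanted]
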